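/- GENERATED by mk_final_copies.py from the proof of the farm's unit `decode_residue.5` (farm:decode_residue.5.1: Lemmas.lean) as the
   re-elaboration sweep compiled it — do not edit. -/
import Asan.CheckWalk
import Vorbis.Spec.Units.decode_residue_5

open X86 X86.User Asan Vorbis Vorbis.Spec Vorbis.Spec.DecodeResidue

set_option maxRecDepth 4000
set_option maxHeartbeats 4000000

namespace Vorbis.Spec.decode_residue_5

/-- **The windows this segment (and its two callees) may write**, relative to the activation: the stack below the steady stack
pointer (return addresses of the check calls, the callees' frames), the two scratch slots `[rbp−0xb8]` and `[rbp−0xb0]`, and the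
bit reader's windows of `*f`. Everything else of the memory at the segment's entry is still there at every later point — except
the one slot of the temp block stored at the very end. -/
def wins5 (g : G) : List Span :=
  [⟨(g.e.reg .rsp).toNat - 848, (g.e.reg .rsp).toNat - 248⟩,
   ⟨(g.e.reg .rsp).toNat - 192, (g.e.reg .rsp).toNat - 176⟩,
   ⟨(g.e.reg .rdi).toNat + 48, (g.e.reg .rdi).toNat + 56⟩,
   ⟨(g.e.reg .rdi).toNat + 84, (g.e.reg .rdi).toNat + 96⟩,
   ⟨(g.e.reg .rdi).toNat + 136, (g.e.reg .rdi).toNat + 144⟩,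
   ⟨(g.e.reg .rdi).toNat + 1484, (g.e.reg .rdi).toNat + 1749⟩,
   ⟨(g.e.reg .rdi).toNat + 1752, (g.e.reg .rdi).toNat + 1784⟩]

/-- Membership in `wins5`, as a disjunction of equations. -/
theorem mem_wins {g : G} {w : Span} (hw : w ∈ wins5 g) :
    w = ⟨(g.e.reg .rsp).toNat - 848, (g.e.reg .rsp).toNat - 248⟩ ∨
    w = ⟨(g.e.reg .rsp).toNat - 192, (g.e.reg .rsp).toNat - 176⟩ ∨
    w = ⟨(g.e.reg .rdi).toNat + 48, (g.e.reg .rdi).toNat + 56⟩ ∨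
    w = ⟨(g.e.reg .rdi).toNat + 84, (g.e.reg .rdi).toNat + 96⟩ ∨
    w = ⟨(g.e.reg .rdi).toNat + 136, (g.e.reg .rdi).toNat + 144⟩ ∨
    w = ⟨(g.e.reg .rdi).toNat + 1484, (g.e.reg .rdi).toNat + 1749⟩ ∨
    w = ⟨(g.e.reg .rdi).toNat + 1752, (g.e.reg .rdi).toNat + 1784⟩ := by
  unfold wins5 at hw
  simp only [List.mem_cons, List.mem_nil_iff, or_false] at hw
  exact hw

/-- **Where `*f` is**: in the data space, off the stack region. -/
theorem where_f {u₀ : State} {g : G} (hent : Entered u₀ g) :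
    0x100000 ≤ g.f ∧ g.f + 1808 ≤ 0xC00000 ∧ (g.f + 1808 ≤ 0x700000 ∨ 0x800000 ≤ g.f) := by
  have hob : g.Blk (objBlock g.f) := hent.vorbis.obj
  have hin := hent.pre.env.ok.inside _ hob
  have hst := hent.pre.free.offStack _ hob
  simp only [vblock, voff] at hin hst
  omega

/-- **Every window of `wins5` is a legal decode-time store** (`StoreOK`): the stack windows are off every allocated block, the
five windows of `*f` lie in its decode-time holes. -/
theorem wins_storeOK {u₀ : State} {g : G} (hent : Entered u₀ g) (mem : Mem) :
    ∀ s, s ∈ wins5 g → StoreOK g.Blk mem g.f s := by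
  intro s hs
  have hroom := hent.room
  have eR : (g.e.reg .rsp).toNat = g.RA := rfl
  have ef : (g.e.reg .rdi).toNat = g.f := rfl
  rcases mem_wins hs with rfl | rfl | rfl | rfl | rfl | rfl | rfl
  · apply StoreOK.off
    intro B hB
    have := hent.pre.free.offStack B hB
    simp only []
    omega
  · apply StoreOK.off
    intro B hB
    have := hent.pre.free.offStack B hB
    simp only []
    omega
  all_goals
    apply StoreOK.hole
    unfold InHole
    simp only []
    omega

/-- **Every window of `wins5` lies inside the contract's footprint.** -/
theorem wins_sub_footprint {u₀ : State} {g : G} (hent : Entered u₀ g) :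
    ∀ w ∈ wins5 g, w.hi ≤ w.lo ∨ InSpans (g.spec.footprint g.e) w.lo (w.hi - w.lo) := by
  intro w hw
  have hroom := hent.room
  have eR : (g.e.reg .rsp).toNat = g.RA := rfl
  right
  unfold Spec.footprint
  have hwr : g.spec.writes g.e = DecodeResidue.writes g.A g.e := rfl
  rw [hwr]
  unfold DecodeResidue.writes
  have hfr : g.spec.frame = 848 := rfl
  rw [hfr]
  rcases mem_wins hw with rfl | rfl | rfl | rfl | rfl | rfl | rfl
  · exact ⟨_, List.Mem.head _, by simp only []; omega, by simp only []; omega⟩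
  · exact ⟨_, List.Mem.head _, by simp only []; omega, by simp only []; omega⟩
  · exact ⟨_, List.Mem.tail _ (List.mem_append_left _ (List.Mem.head _)), by simp only []; omega, by simp only []; omega⟩
  · exact ⟨_, List.Mem.tail _ (List.mem_append_left _ (List.Mem.tail _ (List.Mem.head _))),
      by simp only []; omega, by simp only []; omega⟩
  · exact ⟨_, List.Mem.tail _ (List.mem_append_left _ (List.Mem.tail _ (List.Mem.tail _ (List.Mem.head _)))),
      by simp only []; omega, by simp only []; omega⟩
  · exact ⟨_, List.Mem.tail _ (List.mem_append_left _ (List.Mem.tail _ (List.Mem.tail _ (List.Mem.tail _ (List.Mem.head _))))),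
      by simp only []; omega, by simp only []; omega⟩
  · exact ⟨_, List.Mem.tail _ (List.mem_append_left _
      (List.Mem.tail _ (List.Mem.tail _ (List.Mem.tail _ (List.Mem.tail _ (List.Mem.head _)))))),
      by simp only []; omega, by simp only []; omega⟩

/-- A stack slot `[RA − k, RA − k + n)` of the frame that lies outside the two stack windows of `wins5` reads the same. -/
theorem slot_kept {u₀ : State} {g : G} (hent : Entered u₀ g) {m m' : Mem} (hs : Mem.SameExcept (wins5 g) m m')
    (k n : Nat) (hn : n ≤ k) (hk : k ≤ 248) (hoff : n + 192 ≤ k ∨ k ≤ 176) :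
    m'.readLE (g.e.reg .rsp - UInt64.ofNat k) n = m.readLE (g.e.reg .rsp - UInt64.ofNat k) n := by
  have hroom := hent.room
  have hw := where_f hent
  have eR : (g.e.reg .rsp).toNat = g.RA := rfl
  have ef : (g.e.reg .rdi).toNat = g.f := rfl
  have ea : (g.e.reg .rsp - UInt64.ofNat k).toNat = g.RA - k := by
    rw [UInt64.toNat_sub_of_le]
    · rw [UInt64.toNat_ofNat', eR, Nat.mod_eq_of_lt (by omega)]
    · rw [UInt64.le_iff_toNat_le, UInt64.toNat_ofNat', eR, Nat.mod_eq_of_lt (by omega)]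
      omega
  apply hs.readLE _ _ (by rw [ea]; omega)
  intro w hw'
  rw [ea]
  rcases mem_wins hw' with rfl | rfl | rfl | rfl | rfl | rfl | rfl <;> simp only [] <;> omega

/-- **Where the temp block is**: inside the free part of the arena, hence in the data space, off the stack region and off
`*f`. -/
theorem where_tb {u₀ : State} {g : G} {v : State} (hent : Entered u₀ g) (hc : Common u₀ g v) :
    g.A.B + g.A.S ≤ g.TB.base ∧ g.TB.base + g.TB.size + 32 ≤ g.A.B + g.A.L ∧
    0x100000 ≤ g.TB.base ∧ g.TB.base + g.TB.size ≤ 0xC00000 ∧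
    (g.TB.base + g.TB.size ≤ 0x700000 ∨ 0x800000 ≤ g.TB.base) ∧
    (g.TB.base + g.TB.size ≤ g.f ∨ g.f + 1808 ≤ g.TB.base) := by
  have hb : ADOBusy g.A' g.others' v.mem g.f g.sz := hc.point.busy
  have hr := hb.ok.tblock_range hc.tblock
  have h2 := hb.ok.AR2
  have h1 := hent.ado.ok.AR1
  have h1x := hent.ado.ok.AR1x
  have hob : g.Blk (objBlock g.f) := hent.vorbis.obj
  have hgap := hent.pre.free.offGap _ hob
  have hle := le_r8 g.TB.size
  simp only [G.A', varena] at hr h2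
  simp only [vblock, voff] at hgap
  omega

/-- **COMMON again after a batch of stores inside `wins5`** (a callee of the bit reader's family returned; the inline DECODE
stored `acc` / `valid_bits`; return addresses and spills went to the own frame): the frame slots outside the windows read the
same (`slot_kept`), the footprint composes (`wins_sub_footprint`), the shadow layer is kept verbatim, the arena fields and the
row-pointer table of the temp block are off the windows. `Bits` and `μ` of the new memory are the worker's. -/
theorem carry_common {u₀ : State} {g : G} {v s : State} (hent : Entered u₀ g) (hc : Common u₀ g v)
    (rbp : s.reg .rbp = g.e.reg .rsp - 8) (rsp : s.reg .rsp = g.e.reg .rsp - 248)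
    (code : CodeOK u₀ s.mem) (inv : abiInv s)
    (fr_f : UInt64.ofNat (s.mem.readLE (g.e.reg .rsp - 184) 8) = g.e.reg .rdi)
    (hs : Mem.SameExcept (wins5 g) v.mem s.mem) (hun : ShadowUntouched v.mem s.mem)
    (hb : Bits g.Blk g.len s.mem g.f) (hmu : mu s.mem g.f ≤ mu v.mem g.f) : Common u₀ g s := by
  have hroom := hent.room
  have hwf := where_f hent
  have hwt := where_tb hent hc
  have eR : (g.e.reg .rsp).toNat = g.RA := rfl
  have ef : (g.e.reg .rdi).toNat = g.f := rfl
  have hbusy : ADOBusy g.A' g.others' v.mem g.f g.sz := hc.point.busy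
  apply Common.of_frame hent rbp rsp code inv
  · have e : s.mem.readLE (g.e.reg .rsp - 8) 8 = v.mem.readLE (g.e.reg .rsp - 8) 8 :=
      slot_kept hent hs 8 8 (by omega) (by omega) (by omega)
    rw [e]
    exact hc.s_rbp
  · have e : s.mem.readLE (g.e.reg .rsp - 16) 8 = v.mem.readLE (g.e.reg .rsp - 16) 8 :=
      slot_kept hent hs 16 8 (by omega) (by omega) (by omega)
    rw [e]
    exact hc.s_r15
  · have e : s.mem.readLE (g.e.reg .rsp - 24) 8 = v.mem.readLE (g.e.reg .rsp - 24) 8 :=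
      slot_kept hent hs 24 8 (by omega) (by omega) (by omega)
    rw [e]
    exact hc.s_r14
  · have e : s.mem.readLE (g.e.reg .rsp - 32) 8 = v.mem.readLE (g.e.reg .rsp - 32) 8 :=
      slot_kept hent hs 32 8 (by omega) (by omega) (by omega)
    rw [e]
    exact hc.s_r13
  · have e : s.mem.readLE (g.e.reg .rsp - 40) 8 = v.mem.readLE (g.e.reg .rsp - 40) 8 :=
      slot_kept hent hs 40 8 (by omega) (by omega) (by omega)
    rw [e]
    exact hc.s_r12
  · have e : s.mem.readLE (g.e.reg .rsp - 48) 8 = v.mem.readLE (g.e.reg .rsp - 48) 8 :=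
      slot_kept hent hs 48 8 (by omega) (by omega) (by omega)
    rw [e]
    exact hc.s_rbx
  · exact fr_f
  · have e : s.mem.readLE (g.e.reg .rsp - 216) 8 = v.mem.readLE (g.e.reg .rsp - 216) 8 :=
      slot_kept hent hs 216 8 (by omega) (by omega) (by omega)
    rw [e]
    exact hc.fr_rb
  · have e : s.mem.readLE (g.e.reg .rsp - 156) 4 = v.mem.readLE (g.e.reg .rsp - 156) 4 :=
      slot_kept hent hs 156 4 (by omega) (by omega) (by omega)
    rw [e]
    exact hc.fr_ch
  · have e : s.mem.readLE (g.e.reg .rsp - 196) 4 = v.mem.readLE (g.e.reg .rsp - 196) 4 :=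
      slot_kept hent hs 196 4 (by omega) (by omega) (by omega)
    rw [e]
    exact hc.fr_prd
  · have e : s.mem.readLE (g.e.reg .rsp - 200) 4 = v.mem.readLE (g.e.reg .rsp - 200) 4 :=
      slot_kept hent hs 200 4 (by omega) (by omega) (by omega)
    rw [e]
    exact hc.fr_w
  · have e : s.mem.readLE (g.e.reg .rsp - 232) 4 = v.mem.readLE (g.e.reg .rsp - 232) 4 :=
      slot_kept hent hs 232 4 (by omega) (by omega) (by omega)
    rw [e]
    exact hc.fr_rtype
  · have e : s.mem.readLE (g.e.reg .rsp - 176) 8 = v.mem.readLE (g.e.reg .rsp - 176) 8 :=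
      slot_kept hent hs 176 8 (by omega) (by omega) (by omega)
    rw [e]
    exact hc.fr_pcd
  · have e : s.mem.readLE (g.e.reg .rsp - 240) 8 = v.mem.readLE (g.e.reg .rsp - 240) 8 :=
      slot_kept hent hs 240 8 (by omega) (by omega) (by omega)
    rw [e]
    exact hc.fr_si
  · exact Mem.SameExcept.step_same' hc.same hs (wins_sub_footprint hent)
  · exact hc.shadow.untouched hun
  · exact hb
  · apply hbusy.transfer
    apply ObjEq.of_sameExcept hs
    · intro w hw
      simp only [ADO.wins, List.mem_cons, List.mem_nil_iff, or_false] at hw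
      rcases hw with rfl | rfl <;> simp only [] <;> omega
    · intro w hw sp hsp
      simp only [ADO.wins, List.mem_cons, List.mem_nil_iff, or_false] at hw
      rcases mem_wins hsp with rfl | rfl | rfl | rfl | rfl | rfl | rfl <;> rcases hw with rfl | rfl <;> simp only [] <;> omega
  · apply hc.tb.frame
    apply Block.Kept.of_sameExcept hs
    · intro w hw
      have hsz := hc.tb.size
      have hC : 8 * g.C ≤ g.TB.size := by
        rw [hsz, Nat.mul_add]
        have : 8 * g.C = g.C * 8 := Nat.mul_comm _ _
        omega
      rcases mem_wins hw with rfl | rfl | rfl | rfl | rfl | rfl | rfl <;> simp only [] <;> omega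
    · simp only []
      have hsz := hc.tb.size
      have hC : 8 * g.C ≤ g.TB.size := by
        rw [hsz, Nat.mul_add]
        have : 8 * g.C = g.C * 8 := Nat.mul_comm _ _
        omega
      omega
  · exact Nat.le_trans hmu hc.mu_le

/-- The record, the class book's header read the same in two memories that both read them as the entry memory does. -/
theorem reads_between {u₀ : State} {g : G} {v s : State} (hc : Common u₀ g v) (hcs : Common u₀ g s) :
    ResidueReads v.mem g.f s.mem g.f g.r := by
  have h1 := hc.reads
  have h2 := hcs.reads
  exact ⟨h2.begin.trans h1.begin.symm, h2.end_.trans h1.end_.symm, h2.part_size.trans h1.part_size.symm,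
    h2.classifications.trans h1.classifications.symm, h2.classbook.trans h1.classbook.symm,
    h2.classdata.trans h1.classdata.symm, h2.residue_books.trans h1.residue_books.symm,
    h2.codebook_count.trans h1.codebook_count.symm, h2.cbk.trans h1.cbk.symm, h2.E.trans h1.E.symm,
    h2.W.trans h1.W.symm⟩

/-- **The `classdata` table of the record is kept by a batch of stores inside `wins5`** (a CONFIG block: `StoreOK.reads_kept`). -/
theorem classdata_kept {u₀ : State} {g : G} {v : State} {m : Mem} (hent : Entered u₀ g) (hc : Common u₀ g v)
    (hs : Mem.SameExcept (wins5 g) v.mem m) :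
    (Block.mk (Residue.classdata v.mem g.r) (8 * Residue.E v.mem g.f g.r)).Kept v.mem m := by
  have hv : Real.VorbisOK g.len g.Blk v.mem g.f := hc.point.vorbis
  have hcfg : ConfigOK g.Blk v.mem g.f := hv.config
  have hk := StoreOK.reads_kept hcfg hent.pre.env.ok hc.sep hs (wins_storeOK hent v.mem)
  apply hk
  apply ConfigOK.Reads.residue
  apply ResidueOK.Owns.record g.rn (hc.rn_lt hent)
  rw [hc.config_at]
  exact ResidueAtOK.Owns.classdata

/-- **The whole temp block is kept by a batch of stores inside `wins5`.** -/
theorem tb_kept {u₀ : State} {g : G} {v : State} {m : Mem} (hent : Entered u₀ g) (hc : Common u₀ g v)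
    (hs : Mem.SameExcept (wins5 g) v.mem m) : g.TB.Kept v.mem m := by
  have hroom := hent.room
  have hwf := where_f hent
  have hwt := where_tb hent hc
  have eR : (g.e.reg .rsp).toNat = g.RA := rfl
  have ef : (g.e.reg .rdi).toNat = g.f := rfl
  apply Block.Kept.of_sameExcept hs
  · intro w hw
    rcases mem_wins hw with rfl | rfl | rfl | rfl | rfl | rfl | rfl <;> simp only [] <;> omega
  · omega

/-- **FILL of a row is kept by a batch of stores inside `wins5`.** -/
theorem fill_kept {u₀ : State} {g : G} {v s : State} (hent : Entered u₀ g) (hc : Common u₀ g v) (hcs : Common u₀ g s)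
    (hs : Mem.SameExcept (wins5 g) v.mem s.mem) {j m : Nat} (hj : j < g.C) (hm : m ≤ g.PRD)
    (h : Fill v.mem g.f g.r g.TB g.C g.PRD j m) : Fill s.mem g.f g.r g.TB g.C g.PRD j m :=
  h.frame hj hm hc.tb.size (tb_kept hent hc hs) (reads_between hc hcs) (classdata_kept hent hc hs)

/-- An `int` of the own frame above the windows (`c_inter`, `p_inter`) reads the same after a batch of stores inside `wins5`. -/
theorem i32_kept {u₀ : State} {g : G} (hent : Entered u₀ g) {m m' : Mem} (hs : Mem.SameExcept (wins5 g) m m')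
    (a : Nat) (h1 : g.RA - 176 ≤ a) (h2 : a + 4 ≤ g.RA) : m'.i32 a = m.i32 a := by
  have hroom := hent.room
  have hw := where_f hent
  have eR : (g.e.reg .rsp).toNat = g.RA := rfl
  have ef : (g.e.reg .rdi).toNat = g.f := rfl
  have ea : (addr a).toNat = a := toNat_addr a (by omega)
  have e : m'.readLE (addr a) 4 = m.readLE (addr a) 4 := by
    apply hs.readLE _ _ (by rw [ea]; omega)
    intro w hw'
    rw [ea]
    rcases mem_wins hw' with rfl | rfl | rfl | rfl | rfl | rfl | rfl <;> simp only [] <;> omega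
  show sint32 (m'.readLE (addr a) 4) = sint32 (m.readLE (addr a) 4)
  rw [e]

/-- **The loop part of the entry assertion (`DecodeA`) again after a batch of stores inside `wins5`**: the three slots of path A
and `class_set` are outside the windows, FILL is kept (`fill_kept`), the two ints of the protected frame are above the windows. -/
theorem carry_decodeA {u₀ : State} {g : G} {v s : State} {cs pcount : Nat} (hent : Entered u₀ g) (hc : Common u₀ g v)
    (hcs : Common u₀ g s) (hch2 : g.ch = 2) (hs : Mem.SameExcept (wins5 g) v.mem s.mem) (hl : DecodeA g cs pcount v)
    (r15 : s.reg .r15 = UInt64.ofNat pcount) : DecodeA g cs pcount s := by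
  have hroom := hent.room
  have hC : 0 < g.C := by
    have := hent.args.ch_le
    have e : g.C = nchan g.e.mem g.f := rfl
    omega
  refine ⟨⟨hl.path.rtype2, hl.path.ch_ge, hl.path.pass_le, ?_, ?_, ?_⟩, r15, ?_, ?_, hl.lt, ?_⟩
  · have e : s.mem.readLE (g.e.reg .rsp - 168) 4 = v.mem.readLE (g.e.reg .rsp - 168) 4 :=
      slot_kept hent hs 168 4 (by omega) (by omega) (by omega)
    rw [e]
    exact hl.path.sl_pass
  · have e : s.mem.readLE (g.e.reg .rsp - 228) 4 = v.mem.readLE (g.e.reg .rsp - 228) 4 :=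
      slot_kept hent hs 228 4 (by omega) (by omega) (by omega)
    rw [e]
    exact hl.path.sl_tap
  · have e : s.mem.readLE (g.e.reg .rsp - 208) 4 = v.mem.readLE (g.e.reg .rsp - 208) 4 :=
      slot_kept hent hs 208 4 (by omega) (by omega) (by omega)
    rw [e]
    exact hl.path.sl_n
  · have e : s.mem.readLE (g.e.reg .rsp - 224) 4 = v.mem.readLE (g.e.reg .rsp - 224) 4 :=
      slot_kept hent hs 224 4 (by omega) (by omega) (by omega)
    rw [e]
    exact hl.sl_cs
  · apply hl.wa.frame (fun j h => h) ?_ (hc.w_pos hent)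
    intro j m hj hF hm
    have hj0 : j = 0 := hj
    exact fill_kept hent hc hcs hs (by omega) hm hF
  · apply hl.inter.frame
    · exact i32_kept hent hs g.ci (by unfold G.ci; omega) (by unfold G.ci; omega)
    · exact i32_kept hent hs g.pi (by unfold G.pi; omega) (by unfold G.pi; omega)

/-- The join after `prep_huffman` (`mov rbx,[rbp-0xb0]` at 0x10efbb: the bit reader has at least 10 bits or is at the end). -/
abbrev joinB : Word := Vorbis.L.decode_residue.entry + 0x3bb

/-- The join after DECODE_RAW (`lea rdi,[r12+0x1b]` at 0x10f06d: r13d holds the raw result). -/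
abbrev joinC : Word := Vorbis.L.decode_residue.entry + 0x46d

/-- The join after the `sorted_values` translation (`cmp r13d,-1` at 0x10f0a6: r13d holds `q`). -/
abbrev joinD : Word := Vorbis.L.decode_residue.entry + 0x4a6

/-- The class book of the residue, `f->codebooks + r->classbook`, as read at the function's entry. -/
def cbk5 (g : G) : Nat := Residue.cbk g.e.mem g.f g.r

/-- **Where the residue record is**: in the data space, off the stack region, off `*f`. -/
theorem where_r {u₀ : State} {g : G} {v : State} (hent : Entered u₀ g) (hc : Common u₀ g v) :
    0x100000 ≤ g.r ∧ g.r + 32 ≤ 0xC00000 ∧ (g.r + 32 ≤ 0x700000 ∨ 0x800000 ≤ g.r) ∧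
    (g.r + 32 ≤ g.f ∨ g.f + 1808 ≤ g.r) := by
  have hv : Real.VorbisOK g.len g.Blk v.mem g.f := hc.point.vorbis
  have hcfg : ConfigOK g.Blk v.mem g.f := hv.config
  have hR : ResidueOK g.Blk v.mem g.f := hv.residue
  have hB := hR.R2
  have hin := hent.pre.env.ok.inside _ hB
  have hst := hent.pre.free.offStack _ hB
  have hd := hc.sep.obj _ (ConfigOK.Reads.residue ResidueOK.Owns.config)
  have hlt := hc.rn_lt hent
  have h1 := hR.R1
  have e := hc.config_at
  unfold stb_vorbis.residue_config_at at e
  simp only [vblock, voff] at hin hst hd e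
  omega

/-- **A field of the residue record** is a check site (R2). -/
theorem site_r {u₀ : State} {g : G} {v : State} (hent : Entered u₀ g) (hc : Common u₀ g v) (off n : Nat)
    (hoff : off + n ≤ 32) (hn : 1 ≤ n) : Site g.Live' (g.r + off) n := by
  have hv : Real.VorbisOK g.len g.Blk v.mem g.f := hc.point.vorbis
  have hR : ResidueOK g.Blk v.mem g.f := hv.residue
  have hL : BlkLive g.Blk g.Live' := hc.point.env.live
  apply hR.site_record hL (hc.rn_lt hent) off n (by simp only [voff]; omega) hn
  rw [hc.config_at]

/-- **A field of `*f`** is a check site (OB1). -/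
theorem site_f5 {u₀ : State} {g : G} {v : State} (hc : Common u₀ g v) (off n : Nat)
    (hoff : off + n ≤ 1808) (hn : 1 ≤ n) : Site g.Live' (g.f + off) n := by
  have hv : Real.VorbisOK g.len g.Blk v.mem g.f := hc.point.vorbis
  have hL : BlkLive g.Blk g.Live' := hc.point.env.live
  exact hv.bits.site_field hL off n hoff hn rfl

/-- **The class book**: its address in the present memory, `CodebookOK`, the struct inside the codebooks block, apart from
`*f`. -/
theorem book_facts {u₀ : State} {g : G} {v : State} (hent : Entered u₀ g) (hc : Common u₀ g v) :
    stb_vorbis.codebooks v.mem g.f + 2120 * Residue.classbook v.mem g.r = cbk5 g ∧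
    CodebookOK g.Blk v.mem (cbk5 g) ∧ BookApart v.mem g.f (cbk5 g) ∧
    (∃ B, g.Blk B ∧ B.contains (cbk5 g) Off.sizeof.Codebook) ∧ Residue.classbook v.mem g.r < 256 := by
  have hv : Real.VorbisOK g.len g.Blk v.mem g.f := hc.point.vorbis
  have hcfg : ConfigOK g.Blk v.mem g.f := hv.config
  have h7 := (hc.resAt hent).R7
  have e : Residue.cbk v.mem g.f g.r = cbk5 g := hc.reads.cbk
  have e' : stb_vorbis.codebooks_at v.mem g.f (Residue.classbook v.mem g.r) = cbk5 g := e
  have hlt : Residue.classbook v.mem g.r < 256 := by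
    simp only [vacc, voff]
    exact Mem.u8_lt _ _
  refine ⟨?_, ?_, ?_, ?_, hlt⟩
  · rw [← e']
    unfold stb_vorbis.codebooks_at
    simp only [voff]
  · rw [← e']
    exact hcfg.books _ h7
  · rw [← e']
    exact hc.sep.bookApart hcfg _ h7
  · rw [← e']
    refine ⟨_, hcfg.cb0.F2, ?_⟩
    have hcnt := hcfg.cb0.F1
    have hi' : Residue.classbook v.mem g.r < (stb_vorbis.codebook_count v.mem g.f).toNat := by omega
    constructor
    · show stb_vorbis.codebooks v.mem g.f ≤ stb_vorbis.codebooks_at v.mem g.f _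
      unfold stb_vorbis.codebooks_at
      omega
    · show stb_vorbis.codebooks_at v.mem g.f _ + Off.sizeof.Codebook ≤
        stb_vorbis.codebooks v.mem g.f + Off.sizeof.Codebook * (stb_vorbis.codebook_count v.mem g.f).toNat
      unfold stb_vorbis.codebooks_at
      simp only [voff]
      omega

/-- **The shadow clause at a callee's entry** (the return address was pushed at `RA − 256`): the layer of the cut point, no
shadow byte written since. -/
theorem shadowPre_call5 {u₀ : State} {g : G} {v s : State} (hent : Entered u₀ g) (hc : Common u₀ g v)
    (hrsp : s.reg .rsp = g.e.reg .rsp - 256) (hun : ShadowUntouched v.mem s.mem) : ShadowPre g.others' g.frames' s := by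
  have hroom := hent.room
  have eR : (g.e.reg .rsp).toNat = g.RA := rfl
  have e : (s.reg .rsp).toNat + 8 = g.RA - 248 := by
    rw [hrsp]
    u_omega
  refine ⟨?_, hent.offText'⟩
  rw [e]
  exact hc.shadow.untouched hun

/-- **prep_huffman's precondition** at its call inside decode_residue (the interface S7 → S2 of DecodeResidueTest). -/
theorem prep_pre {u₀ : State} {g : G} (hent : Entered u₀ g) (s : State) (hsh : ShadowPre g.others' g.frames' s)
    (hrdi : (s.reg .rdi).toNat = g.f) (hb : Bits g.Blk g.len s.mem g.f) :
    (prep_huffman.spec g.others' g.frames' g.Blk g.len).pre s := by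
  refine ⟨hsh, ?_, ?_⟩
  · rw [hrdi]
    exact hent.reader'
  · rw [hrdi]
    exact hb

/-- `movzx eax, byte ; imul rax, rax, 0x848 ; add r12, rax`: the address of the class book, as a number. -/
theorem r12_eq (cbs cb : Nat) (h : cb < 256) :
    UInt64.ofNat cbs + Word.ofBV (BitVec.setWidth 64 (BitVec.zeroExtend 32 (BitVec.ofNat 8 cb))) * 2120 =
      UInt64.ofNat (cbs + 2120 * cb) := by
  have e : Word.ofBV (BitVec.setWidth 64 (BitVec.zeroExtend 32 (BitVec.ofNat 8 cb))) = addr cb := by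
    apply UInt64.toNat_inj.mp
    unfold Word.ofBV addr
    simp only [UInt64.toNat_ofBitVec, BitVec.toNat_setWidth, BitVec.toNat_ofNat, UInt64.toNat_ofNat']
    omega
  rw [e]
  have e2 : (2120 : Word) = addr 2120 := rfl
  rw [e2, addr_mul_addr]
  show addr cbs + addr (cb * 2120) = addr (cbs + 2120 * cb)
  rw [addr_add_addr, Nat.mul_comm]

/-- **Where the class book's struct is**: in the data space, off the stack region, off `*f`. -/
theorem where_cb {u₀ : State} {g : G} {v : State} (hent : Entered u₀ g) (hc : Common u₀ g v) :
    0x100000 ≤ cbk5 g ∧ cbk5 g + 2120 ≤ 0xC00000 ∧ (cbk5 g + 2120 ≤ 0x700000 ∨ 0x800000 ≤ cbk5 g) ∧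
    (cbk5 g + 2120 ≤ g.f ∨ g.f + 1808 ≤ cbk5 g) := by
  obtain ⟨_, _, hapart, ⟨B, hB, hin⟩, _⟩ := book_facts hent hc
  have hins := hent.pre.env.ok.inside _ hB
  have hst := hent.pre.free.offStack _ hB
  have hd := hapart.book
  simp only [vblock, voff] at hin hd
  omega

/-- `mov eax, ecx ; and eax, 0x3ff`: the index into `fast_huffman` is below 1024. -/
theorem and_lt (acc : Nat) :
    (Word.ofBV (BitVec.setWidth 64 (BitVec.ofNat 32 acc &&& 1023#32))).toNat < 1024 := by
  unfold Word.ofBV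
  simp only [UInt64.toNat_ofBitVec, BitVec.toNat_setWidth, BitVec.toNat_and, BitVec.toNat_ofNat]
  have h : acc % 2 ^ 32 &&& 1023 % 2 ^ 32 ≤ 1023 % 2 ^ 32 := Nat.and_le_right
  omega

/-- `add rbx, 0x18 ; lea rdi, [r12 + rbx*2]`: the address of `c->fast_huffman[k]`. -/
theorem fh_addr (cb : Nat) (X : Word) : addr cb + (X + 24) * 2 = addr (cb + 48 + 2 * X.toNat) := by
  have e : X = addr X.toNat := (addr_toNat X).symm
  rw [e]
  simp only [vfield]
  rw [toNat_addr _ X.toNat_lt]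
  congr 1
  omega

/-- `movzx ebx, word ; movsx r13d, bx` (and `movsx rbx, bx`): the low 16 bits of the zero-extended load are the load. -/
theorem low16 (fh : Nat) : BitVec.setWidth 16 (BitVec.zeroExtend 32 (BitVec.ofNat 16 fh)) = BitVec.ofNat 16 fh := by
  generalize BitVec.ofNat 16 fh = x
  bv_decide

/-- The sign of a 16-bit load, sign-extended: not negative. -/
theorem msb16_false (fh : Nat) (hfh : fh < 65536) (h : (BitVec.signExtend 32 (BitVec.ofNat 16 fh)).msb = false) :
    0 ≤ sint16 fh := by
  have e : (BitVec.signExtend 32 (BitVec.ofNat 16 fh)).msb = (BitVec.ofNat 16 fh).msb := by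
    generalize BitVec.ofNat 16 fh = x
    bv_decide
  rw [e, BitVec.msb_eq_decide, BitVec.toNat_ofNat] at h
  have h' := of_decide_eq_false h
  unfold sint16
  split <;> omega

/-- The sign of a 16-bit load, sign-extended: negative. -/
theorem msb16_true (fh : Nat) (hfh : fh < 65536) (h : (BitVec.signExtend 32 (BitVec.ofNat 16 fh)).msb = true) :
    sint16 fh < 0 := by
  have e : (BitVec.signExtend 32 (BitVec.ofNat 16 fh)).msb = (BitVec.ofNat 16 fh).msb := by
    generalize BitVec.ofNat 16 fh = x
    bv_decide
  rw [e, BitVec.msb_eq_decide, BitVec.toNat_ofNat] at h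
  have h' := of_decide_eq_true h
  unfold sint16
  split <;> omega

/-- **The class book after a batch of stores inside `wins5`**: the struct and the `sorted_values` block are CONFIG blocks off the
stack and apart from `*f`, so `CodebookOK` and `BookApart` hold in the new memory. -/
theorem book_kept5 {u₀ : State} {g : G} {v : State} {m : Mem} (hent : Entered u₀ g) (hc : Common u₀ g v)
    (hs : Mem.SameExcept (wins5 g) v.mem m) :
    CodebookOK g.Blk m (cbk5 g) ∧ BookApart m g.f (cbk5 g) := by
  obtain ⟨_, hcb, hapart, ⟨B, hB, hin⟩, _⟩ := book_facts hent hc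
  have hok := hent.pre.env.ok
  have hroom := hent.room
  have hwc := where_cb hent hc
  have eR : (g.e.reg .rsp).toNat = g.RA := rfl
  have ef : (g.e.reg .rdi).toNat = g.f := rfl
  have hd1 : ∀ w, w ∈ wins5 g →
      (Codebook.block (cbk5 g)).base + (Codebook.block (cbk5 g)).size ≤ w.lo ∨ w.hi ≤ (Codebook.block (cbk5 g)).base := by
    intro w hw
    simp only [voff]
    rcases mem_wins hw with rfl | rfl | rfl | rfl | rfl | rfl | rfl <;> simp only [] <;> omega
  have hkept : (Codebook.block (cbk5 g)).Kept v.mem m :=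
    Block.Kept.of_sameExcept hs hd1 (Codebook.block_no_wrap hok hB hin)
  constructor
  · apply hcb.frame_sameExcept hok hB hin hs hd1
    intro hse w hw
    have hsv := hcb.K4.sv hse
    have hst := hent.pre.free.offStack _ hsv
    have hins := hok.inside _ hsv
    have hd := hapart.sv hse
    simp only [vblock, voff] at hd hst hins
    rcases mem_wins hw with rfl | rfl | rfl | rfl | rfl | rfl | rfl <;> simp only [] <;> omega
  · exact hapart.frame (Codebook.SameFields.of_kept hkept)

/-- **codebook_decode_scalar_raw's precondition** (`BookPre`) at its call inside this segment. -/
theorem raw_pre {u₀ : State} {g : G} {v s : State} (hent : Entered u₀ g) (hc : Common u₀ g v)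
    (hsh : ShadowPre g.others' g.frames' s) (hrdi : (s.reg .rdi).toNat = g.f) (hrsi : (s.reg .rsi).toNat = cbk5 g)
    (hs : Mem.SameExcept (wins5 g) v.mem s.mem) (hb : Bits g.Blk g.len s.mem g.f) :
    BookPre g.others' g.frames' g.Blk g.len s := by
  obtain ⟨_, _, _, hbook, _⟩ := book_facts hent hc
  obtain ⟨hcb, hap⟩ := book_kept5 hent hc hs
  refine ⟨⟨hsh, ?_, ?_⟩, hent.pre.env.ok, ?_, ?_, ?_⟩
  · rw [hrdi]
    exact hent.reader'
  · rw [hrdi]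
    exact hb
  · rw [hrsi]
    exact hbook
  · rw [hrsi]
    exact hcb
  · rw [hrdi, hrsi]
    exact hap

/-- `c->fast_huffman[k]` as the machine loads it: the signed reading of the 2 bytes at `c + 48 + 2k`. -/
theorem fast_eq (mem : Mem) (c k fh : Nat) (h : mem.readLE (addr (c + 48 + 2 * k)) 2 = fh) :
    Codebook.fast_huffman mem c k = sint16 fh := by
  simp only [vacc, voff]
  show sint16 (mem.readLE (addr (c + 48 + 2 * k)) 2) = sint16 fh
  rw [h]

/-- **A field of the class book's struct** is a check site. -/
theorem site_cbf {u₀ : State} {g : G} {v : State} (hent : Entered u₀ g) (hc : Common u₀ g v) (off n : Nat)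
    (hoff : off + n ≤ 2120) (hn : 1 ≤ n) : Site g.Live' (cbk5 g + off) n := by
  obtain ⟨_, _, _, ⟨B, hB, hin⟩, _⟩ := book_facts hent hc
  have hL : BlkLive g.Blk g.Live' := hc.point.env.live
  exact Codebook.site_field hL hB hin off n (by simp only [voff]; omega) hn rfl

/-- **`c->codeword_lengths[fast_huffman[k]]`** is a check site when the table entry is not negative (K5 + K3). -/
theorem site_len {u₀ : State} {g : G} {v : State} (hent : Entered u₀ g) (hc : Common u₀ g v) (k : Nat) (hk : k < 1024)
    (hv : 0 ≤ Codebook.fast_huffman v.mem (cbk5 g) k) :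
    Site g.Live' (Codebook.codeword_lengths v.mem (cbk5 g) + (Codebook.fast_huffman v.mem (cbk5 g) k).toNat) 1 := by
  obtain ⟨_, hcb, _, _, _⟩ := book_facts hent hc
  have hL : BlkLive g.Blk g.Live' := hc.point.env.live
  apply hcb.site_lengths_of_fast hL k hk hv
  simp only [Codebook.codeword_lengths_at]

/-- **V1 after the inline `valid_bits -= len`** when the result is not negative: `valid_bits ≤ 32` before, `len` a byte. -/
theorem vb_bound (vb : BitVec 32) (l : BitVec 8) (h1 : vb.sle 32#32 = true) (h2 : (4294967295#32).sle vb = true)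
    (h : (vb - BitVec.zeroExtend 32 l).msb = false) :
    (vb - BitVec.zeroExtend 32 l).sle 32#32 = true ∧ (0#32).sle (vb - BitVec.zeroExtend 32 l) = true := by
  bv_decide

/-- **`Bits` and μ after the inline DECODE_RAW**: the stores went to the own frame, to `acc` and to `valid_bits`; the new
`valid_bits` satisfies V1. -/
theorem inline_final {u₀ : State} {g : G} (hent : Entered u₀ g) {m m' : Mem} (hb : Bits g.Blk g.len m g.f)
    (hs : Mem.SameExcept [⟨(g.e.reg .rsp).toNat - 848, (g.e.reg .rsp).toNat - 176⟩,
      ⟨(g.e.reg .rdi).toNat + 1764, (g.e.reg .rdi).toNat + 1772⟩] m m')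
    (hvb : -1 ≤ stb_vorbis.valid_bits m' g.f ∧ stb_vorbis.valid_bits m' g.f ≤ 32) :
    Bits g.Blk g.len m' g.f ∧ mu m' g.f = mu m g.f := by
  have hroom := hent.room
  have hwf := where_f hent
  have eR : (g.e.reg .rsp).toNat = g.RA := rfl
  have ef : (g.e.reg .rdi).toNat = g.f := rfl
  have hE : ∀ lo hi : Nat, g.f ≤ lo → hi ≤ g.f + 1764 → Mem.EqOn lo hi m m' := by
    intro lo hi h1 h2
    apply hs.eqOn
    intro w hw
    simp only [List.mem_cons, List.mem_nil_iff, or_false] at hw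
    rcases hw with rfl | rfl <;> simp only [] <;> omega
  have h1 := hE (g.f + 48) (g.f + 72) (by omega) (by omega)
  have h2 := hE (g.f + 1488) (g.f + 1492) (by omega) (by omega)
  have h3 := hE (g.f + 1752) (g.f + 1756) (by omega) (by omega)
  have h4 := hE (g.f + 1748) (g.f + 1749) (by omega) (by omega)
  have e1 : stb_vorbis.stream_start m' g.f = stb_vorbis.stream_start m g.f := by
    simp only [vacc, voff]
    exact h1.u64 _ (by omega) (by omega) (by omega)
  have e2 : stb_vorbis.stream_end m' g.f = stb_vorbis.stream_end m g.f := by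
    simp only [vacc, voff]
    exact h1.u64 _ (by omega) (by omega) (by omega)
  have e3 : stb_vorbis.stream m' g.f = stb_vorbis.stream m g.f := by
    simp only [vacc, voff]
    exact h1.u64 _ (by omega) (by omega) (by omega)
  have e4 : stb_vorbis.segment_count m' g.f = stb_vorbis.segment_count m g.f := by
    simp only [vacc, voff]
    exact h2.i32 _ (by omega) (by omega) (by omega)
  have e5 : stb_vorbis.next_seg m' g.f = stb_vorbis.next_seg m g.f := by
    simp only [vacc, voff]
    exact h3.i32 _ (by omega) (by omega) (by omega)
  constructor
  · apply hb.update e1 e2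
    · rw [e3]
      exact hb.S3
    · rw [e4]
      exact hb.N1
    · rw [e4, e5]
      exact hb.N2
    · exact hvb
  · exact mu_frame (by omega) h1 h2 h3 h4

/-- **The fields of the class book's struct read the same after a batch of stores inside `wins5`.** -/
theorem book_fields_kept {u₀ : State} {g : G} {v : State} {m : Mem} (hent : Entered u₀ g) (hc : Common u₀ g v)
    (hs : Mem.SameExcept (wins5 g) v.mem m) : Codebook.SameFields v.mem m (cbk5 g) := by
  obtain ⟨_, hcb, hapart, ⟨B, hB, hin⟩, _⟩ := book_facts hent hc
  have hok := hent.pre.env.ok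
  have hroom := hent.room
  have hwc := where_cb hent hc
  have eR : (g.e.reg .rsp).toNat = g.RA := rfl
  have ef : (g.e.reg .rdi).toNat = g.f := rfl
  have hd1 : ∀ w, w ∈ wins5 g →
      (Codebook.block (cbk5 g)).base + (Codebook.block (cbk5 g)).size ≤ w.lo ∨ w.hi ≤ (Codebook.block (cbk5 g)).base := by
    intro w hw
    simp only [voff]
    rcases mem_wins hw with rfl | rfl | rfl | rfl | rfl | rfl | rfl <;> simp only [] <;> omega
  exact Codebook.SameFields.of_kept (Block.Kept.of_sameExcept hs hd1 (Codebook.block_no_wrap hok hB hin))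

/-- A DECODE_RAW result of the class book stays one after a batch of stores inside `wins5` (`N(c)` reads the same). -/
theorem rawResult_kept {u₀ : State} {g : G} {v : State} {m : Mem} (hent : Entered u₀ g) (hc : Common u₀ g v)
    (hs : Mem.SameExcept (wins5 g) v.mem m) {q : Int} (h : DecodeRawResult v.mem (cbk5 g) q) :
    DecodeRawResult m (cbk5 g) q := by
  have e := (book_fields_kept hent hc hs).N
  unfold DecodeRawResult at h ⊢
  rw [e]
  exact h

/-- The other direction of `rawResult_kept`: a DECODE_RAW result in the memory after a batch of stores inside `wins5` is one in
the memory before. -/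
theorem rawResult_back {u₀ : State} {g : G} {v : State} {m : Mem} (hent : Entered u₀ g) (hc : Common u₀ g v)
    (hs : Mem.SameExcept (wins5 g) v.mem m) {q : Int} (h : DecodeRawResult m (cbk5 g) q) :
    DecodeRawResult v.mem (cbk5 g) q := by
  have e := (book_fields_kept hent hc hs).N
  unfold DecodeRawResult at h ⊢
  rw [← e]
  exact h

/-- A zero-extended 32-bit result is the `word32` of its signed reading (`mov r13d, eax` after a callee). -/
theorem word32_argInt (z : Word) (h : z.toNat < 2 ^ 32) : word32 (argInt z) = z := by
  unfold word32 argInt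
  have e : z.toNat % 2 ^ 32 = z.toNat := Nat.mod_eq_of_lt h
  rw [e]
  have e2 : (sint32 z.toNat % 4294967296).toNat = z.toNat := by
    unfold sint32
    split <;> omega
  rw [e2]
  exact addr_toNat z

/-- `vb_bound` over the numbers the walker has: `vb` the unsigned `valid_bits` loaded (V1 for its signed reading), `l` the
length byte; the stored difference, when its sign bit is clear, satisfies V1 again. -/
theorem vb_bound' (vb : Nat) (hvb : vb < 2 ^ 32) (l : BitVec 8) (h1 : -1 ≤ sint32 vb ∧ sint32 vb ≤ 32)
    (h : (BitVec.ofNat 32 vb - BitVec.zeroExtend 32 l).msb = false) :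
    -1 ≤ (BitVec.ofNat 32 vb - BitVec.zeroExtend 32 l).toInt ∧ (BitVec.ofNat 32 vb - BitVec.zeroExtend 32 l).toInt ≤ 32 := by
  have e := toInt_ofNat32 vb hvb
  have k1 : (BitVec.ofNat 32 vb).sle 32#32 = true := by
    rw [BitVec.sle_eq_decide, e]
    have e32 : (32#32 : BitVec 32).toInt = 32 := by decide
    rw [e32]
    exact decide_eq_true h1.2
  have k2 : (4294967295#32 : BitVec 32).sle (BitVec.ofNat 32 vb) = true := by
    rw [BitVec.sle_eq_decide, e]
    have em : (4294967295#32 : BitVec 32).toInt = -1 := by decide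
    rw [em]
    exact decide_eq_true h1.1
  obtain ⟨r1, r2⟩ := vb_bound (BitVec.ofNat 32 vb) l k1 k2 h
  rw [BitVec.sle_eq_decide] at r1 r2
  have r1' := of_decide_eq_true r1
  have r2' := of_decide_eq_true r2
  have e32 : (32#32 : BitVec 32).toInt = 32 := by decide
  have e0 : (0#32 : BitVec 32).toInt = 0 := by decide
  rw [e32] at r1'
  rw [e0] at r2'
  omega

/-- `shl r, 2` is `* 4`. -/
theorem shl2_mul4 (x : Word) : x <<< 2 = x * 4 := by
  bv_decide

/-- `movsxd rbx, r13d ; shl rbx, 2 ; add rbx, [c + 0x838]`: the address of `c->sorted_values[q]` for a 32-bit `q ≥ −1` held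
zero-extended in r13, as the number address of `Codebook.sortedValue`. -/
theorem sv_addr (sv : Nat) (q : Int) (h1 : -1 ≤ q) (h2 : q < 2 ^ 31) (hsv : 4 ≤ sv) :
    Word.ofBV (BitVec.signExtend 64 (Word.part .w32 (word32 q))) <<< 2 + UInt64.ofNat sv =
      addr (sv - 4 + 4 * (q + 1).toNat) := by
  rw [ofBV_signExtend64, part32_toInt]
  have e : sint32 ((word32 q).toNat % 2 ^ 32) = q := by
    unfold word32
    rw [toNat_addr _ (by omega)]
    unfold sint32
    split <;> omega
  rw [e, shl2_mul4, UInt64.add_comm]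
  exact addr_add_word_mul4 sv q h1 hsv

/-- **The translation load `c->sorted_values[q]` of DECODE for a sparse class book** (K4 with its sentinel, K4c): the word
loaded — for `q = −1` the one BEFORE the pointer — is a check site inside the `sorted_values` block, which is off the stack; its
value is a DECODE result. -/
theorem sv_site {u₀ : State} {g : G} {v : State} (hent : Entered u₀ g) (hc : Common u₀ g v)
    (hsp : Codebook.sparse v.mem (cbk5 g) ≠ 0) {q : Int} (hq : DecodeRawResult v.mem (cbk5 g) q) :
    Site g.Live' (Codebook.sorted_values v.mem (cbk5 g) - 4 + 4 * (q + 1).toNat) 4 ∧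
    4 ≤ Codebook.sorted_values v.mem (cbk5 g) ∧
    0x100000 ≤ Codebook.sorted_values v.mem (cbk5 g) - 4 + 4 * (q + 1).toNat ∧
    Codebook.sorted_values v.mem (cbk5 g) - 4 + 4 * (q + 1).toNat + 4 ≤ 0xC00000 ∧
    (Codebook.sorted_values v.mem (cbk5 g) - 4 + 4 * (q + 1).toNat + 4 ≤ 0x700000 ∨
      0x800000 ≤ Codebook.sorted_values v.mem (cbk5 g) - 4 + 4 * (q + 1).toNat) ∧
    -1 ≤ q ∧ q < 2 ^ 31 ∧
    DecodeResult v.mem (cbk5 g) (Codebook.sortedValue v.mem (cbk5 g) q) := by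
  obtain ⟨_, hcb, _, _, _⟩ := book_facts hent hc
  have hL : BlkLive g.Blk g.Live' := hc.point.env.live
  have hok := hent.pre.env.ok
  have hse := hcb.se_pos_of_sparse hsp
  have hge := hcb.sorted_values_ge hok hse
  have hsite := hcb.site_sortedValue hL hsp hq rfl
  have hin := hsite.inside hc.point.env.covers
  have hblk := hcb.K4.sv hse
  have hst := hent.pre.free.offStack _ hblk
  have hNlt := Codebook.N_lt hcb.K1 hcb.K2
  have hN := Codebook.N_sparse (mem := v.mem) (c := cbk5 g) hsp
  have hres := hcb.decode_sparse hok hsp hq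
  simp only [] at hst
  refine ⟨hsite, by omega, hin.1, hin.2, ?_, ?_, ?_, hres⟩
  · cases hq with
    | inl h1 =>
      rw [h1]
      have e0 : ((-1 : Int) + 1).toNat = 0 := rfl
      rw [e0]
      omega
    | inr h2 => omega
  · cases hq with
    | inl h1 => omega
    | inr h2 => omega
  · cases hq with
    | inl h1 => omega
    | inr h2 => omega

/-- A DECODE result of the class book stays one after a batch of stores inside `wins5` (`entries` reads the same). -/
theorem result_kept {u₀ : State} {g : G} {v : State} {m : Mem} (hent : Entered u₀ g) (hc : Common u₀ g v)
    (hs : Mem.SameExcept (wins5 g) v.mem m) {q : Int} (h : DecodeResult v.mem (cbk5 g) q) :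
    DecodeResult m (cbk5 g) q := by
  have e := (book_fields_kept hent hc hs).entries
  unfold DecodeResult at h ⊢
  rw [e]
  exact h

/-- `mov r13d, [m]`: the zero-extended 32-bit load is the `word32` of its signed reading. -/
theorem word32_sint32 (x : Nat) (h : x < 2 ^ 32) : Word.ofBV (BitVec.ofNat 32 x) = word32 (sint32 x) := by
  rw [ofBV_eq_addr _ (by decide), BitVec.toNat_ofNat, Nat.mod_eq_of_lt h]
  unfold word32
  have e2 : (sint32 x % 4294967296).toNat = x := by
    unfold sint32
    split <;> omega
  rw [e2]

/-- The low half of `word32 q` as a number (`cmp r13d, -1`). -/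
theorem part32_word32 (q : Int) :
    (Word.part .w32 (word32 q)).toNat = (q % 4294967296).toNat := by
  unfold Word.part word32
  simp only [Width.bits, BitVec.toNat_setWidth, UInt64.toNat_toBitVec]
  rw [toNat_addr _ (by omega)]
  omega

/-- `shl r, 3` is `* 8`. -/
theorem shl3_mul8 (x : Word) : x <<< 3 = x * 8 := by
  bv_decide

/-- `movsxd rax, r13d ; shl rax, 3 ; add rax, [r + 0x10]`: the address of `r->classdata[q]`, `q ≥ 0`. -/
theorem cd_addr (cd : Nat) (q : Int) (h1 : 0 ≤ q) (h2 : q < 2 ^ 31) :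
    Word.ofBV (BitVec.signExtend 64 (Word.part .w32 (word32 q))) <<< 3 + UInt64.ofNat cd = addr (cd + 8 * q.toNat) := by
  rw [ofBV_signExtend64, part32_toInt]
  have e : sint32 ((word32 q).toNat % 2 ^ 32) = q := by
    unfold word32
    rw [toNat_addr _ (by omega)]
    unfold sint32
    split <;> omega
  rw [e, shl3_mul8, word_nonneg q h1]
  have e8 : (8 : Word) = addr 8 := rfl
  rw [e8, addr_mul_addr]
  show addr (q.toNat * 8) + addr cd = _
  rw [addr_add_addr]
  congr 1
  omega

/-- `movsxd rax, [rbp-0xd8] ; shl rax, 3 ; add rax, [r13]`: the address of `part_classdata[0][class_set]`. -/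
theorem slot_addr (row0 cs : Nat) (h : cs < 2 ^ 31) :
    Word.ofBV (BitVec.signExtend 64 (BitVec.ofNat 32 cs)) <<< 3 + UInt64.ofNat row0 = addr (row0 + 8 * cs) := by
  rw [ofBV_signExtend64, toInt_ofNat32 cs (by omega)]
  have e : sint32 cs = (cs : Int) := by
    unfold sint32
    rw [if_pos (by omega)]
  rw [e, shl3_mul8, word_nonneg _ (Int.natCast_nonneg _), Int.toNat_natCast]
  have e8 : (8 : Word) = addr 8 := rfl
  rw [e8, addr_mul_addr]
  show addr (cs * 8) + addr row0 = _
  rw [addr_add_addr]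
  congr 1
  omega

/-- **`r->classdata[q]` for a DECODE result `q ≠ −1` of the class book** (R8a): the pointer table entry is a check site inside
the `classdata` block, which is off the stack; the pointer loaded is a row pointer. -/
theorem cd_site {u₀ : State} {g : G} {v : State} (hent : Entered u₀ g) (hc : Common u₀ g v) {q : Int}
    (hq : DecodeResult v.mem (cbk5 g) q) (hne : q ≠ -1) :
    0 ≤ q ∧ q < 2 ^ 31 ∧
    Site g.Live' (Residue.classdata v.mem g.r + 8 * q.toNat) 8 ∧
    0x100000 ≤ Residue.classdata v.mem g.r + 8 * q.toNat ∧
    Residue.classdata v.mem g.r + 8 * q.toNat + 8 ≤ 0xC00000 ∧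
    (Residue.classdata v.mem g.r + 8 * q.toNat + 8 ≤ 0x700000 ∨ 0x800000 ≤ Residue.classdata v.mem g.r + 8 * q.toNat) ∧
    RowPtr v.mem g.f g.r (v.mem.ptr (Residue.classdata v.mem g.r + 8 * q.toNat)) := by
  obtain ⟨_, hcb, _, _, _⟩ := book_facts hent hc
  have hL : BlkLive g.Blk g.Live' := hc.point.env.live
  have hres := hc.resAt hent
  have ecb : Residue.cbk v.mem g.f g.r = cbk5 g := hc.reads.cbk
  have hE : Residue.E v.mem g.f g.r = (Codebook.entries v.mem (cbk5 g)).toNat := by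
    unfold Residue.E
    rw [ecb]
  have hK1 := hcb.K1
  have hlt : Codebook.entries v.mem (cbk5 g) < 2 ^ 31 := by
    have h2 := hK1.ent_lt
    omega
  have hq' : 0 ≤ q ∧ q < Codebook.entries v.mem (cbk5 g) := by
    cases hq with
    | inl h => exact absurd h hne
    | inr h => exact h
  have hqE : q.toNat < Residue.E v.mem g.f g.r := by
    rw [hE]
    omega
  have hsite := hres.site_classdata hL hqE rfl
  have hin := hsite.inside hc.point.env.covers
  have hst := hent.pre.free.offStack _ hres.R8a
  simp only [] at hst
  refine ⟨hq'.1, by omega, hsite, hin.1, hin.2, by omega, ?_⟩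
  exact RowPtr.of_row v.mem g.f g.r hqE

/-- A read of the own frame `[RA − k, RA − k + n)`, `k ≤ 248`, is not changed by stores off the stack region. -/
theorem frame_kept {u₀ : State} {g : G} (hent : Entered u₀ g) {m m' : Mem} {lo hi : Nat}
    (hs : Mem.SameExcept [⟨lo, hi⟩] m m') (hoff : hi ≤ 0x700000 ∨ 0x800000 ≤ lo)
    (k n : Nat) (hn : n ≤ k) (hk : k ≤ 248) :
    m'.readLE (g.e.reg .rsp - UInt64.ofNat k) n = m.readLE (g.e.reg .rsp - UInt64.ofNat k) n := by
  have hroom := hent.room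
  have eR : (g.e.reg .rsp).toNat = g.RA := rfl
  have ea : (g.e.reg .rsp - UInt64.ofNat k).toNat = g.RA - k := by
    rw [UInt64.toNat_sub_of_le]
    · rw [UInt64.toNat_ofNat', eR, Nat.mod_eq_of_lt (by omega)]
    · rw [UInt64.le_iff_toNat_le, UInt64.toNat_ofNat', eR, Nat.mod_eq_of_lt (by omega)]
      omega
  apply hs.readLE _ _ (by rw [ea]; omega)
  intro w hw'
  rw [ea]
  have e : w = ⟨lo, hi⟩ := List.mem_singleton.mp hw'
  subst e
  simp only []
  omega

/-- **COMMON after the store of pass 0**, `part_classdata[0][class_set] = r->classdata[q]`: one 8-byte store into a slot of the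
temp block — off the stack, off `*f`, off every allocated block, inside the free part of the arena (a window of the footprint). -/
theorem final_common {u₀ : State} {g : G} {s1 s2 : State} {cs : Nat} (hent : Entered u₀ g) (hc : Common u₀ g s1)
    (hch2 : g.ch = 2) (hcs : cs < g.PRD)
    (rbp : s2.reg .rbp = g.e.reg .rsp - 8) (rsp : s2.reg .rsp = g.e.reg .rsp - 248)
    (code : CodeOK u₀ s2.mem) (inv : abiInv s2) (row : Nat)
    (hmem : s2.mem = s1.mem.writeLE (addr (slot g.TB g.C g.PRD 0 cs)) 8 row)
    (hun : ShadowUntouched s1.mem s2.mem) :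
    Common u₀ g s2 ∧
      Mem.SameExcept [⟨slot g.TB g.C g.PRD 0 cs, slot g.TB g.C g.PRD 0 cs + 8⟩] s1.mem s2.mem := by
  have hroom := hent.room
  have hwf := where_f hent
  have hwt := where_tb hent hc
  have eR : (g.e.reg .rsp).toNat = g.RA := rfl
  have ef : (g.e.reg .rdi).toNat = g.f := rfl
  have hC : 0 < g.C := by
    have := hent.args.ch_le
    have e : g.C = nchan g.e.mem g.f := rfl
    omega
  have hin := slot_inside g.TB hC hcs hc.tb.size
  have ea : (addr (slot g.TB g.C g.PRD 0 cs)).toNat = slot g.TB g.C g.PRD 0 cs := toNat_addr _ (by omega)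
  have hs : Mem.SameExcept [⟨slot g.TB g.C g.PRD 0 cs, slot g.TB g.C g.PRD 0 cs + 8⟩] s1.mem s2.mem := by
    rw [hmem]
    apply Mem.SameExcept.step_writeLE' _ _ _ (Mem.SameExcept.refl _ _) (by rw [ea]; omega)
    rw [ea]
    exact ⟨_, List.Mem.head _, Nat.le_refl _, Nat.le_refl _⟩
  have hoffst : slot g.TB g.C g.PRD 0 cs + 8 ≤ 0x700000 ∨ 0x800000 ≤ slot g.TB g.C g.PRD 0 cs := by omega
  have hbusy : ADOBusy g.A' g.others' s1.mem g.f g.sz := hc.point.busy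
  have hbits : Bits g.Blk g.len s1.mem g.f := (show Real.VorbisOK g.len g.Blk s1.mem g.f from hc.point.vorbis).bits
  have hobj : (objBlock g.f).Same s1.mem s2.mem := by
    apply Block.Same.of_sameExcept hs
    intro w hw
    have e : w = ⟨slot g.TB g.C g.PRD 0 cs, slot g.TB g.C g.PRD 0 cs + 8⟩ := List.mem_singleton.mp hw
    subst e
    simp only [vblock, voff]
    omega
  refine ⟨?_, hs⟩
  apply Common.of_frame hent rbp rsp code inv
  · have e : s2.mem.readLE (g.e.reg .rsp - 8) 8 = s1.mem.readLE (g.e.reg .rsp - 8) 8 :=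
      frame_kept hent hs hoffst 8 8 (by omega) (by omega)
    rw [e]
    exact hc.s_rbp
  · have e : s2.mem.readLE (g.e.reg .rsp - 16) 8 = s1.mem.readLE (g.e.reg .rsp - 16) 8 :=
      frame_kept hent hs hoffst 16 8 (by omega) (by omega)
    rw [e]
    exact hc.s_r15
  · have e : s2.mem.readLE (g.e.reg .rsp - 24) 8 = s1.mem.readLE (g.e.reg .rsp - 24) 8 :=
      frame_kept hent hs hoffst 24 8 (by omega) (by omega)
    rw [e]
    exact hc.s_r14
  · have e : s2.mem.readLE (g.e.reg .rsp - 32) 8 = s1.mem.readLE (g.e.reg .rsp - 32) 8 :=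
      frame_kept hent hs hoffst 32 8 (by omega) (by omega)
    rw [e]
    exact hc.s_r13
  · have e : s2.mem.readLE (g.e.reg .rsp - 40) 8 = s1.mem.readLE (g.e.reg .rsp - 40) 8 :=
      frame_kept hent hs hoffst 40 8 (by omega) (by omega)
    rw [e]
    exact hc.s_r12
  · have e : s2.mem.readLE (g.e.reg .rsp - 48) 8 = s1.mem.readLE (g.e.reg .rsp - 48) 8 :=
      frame_kept hent hs hoffst 48 8 (by omega) (by omega)
    rw [e]
    exact hc.s_rbx
  · have e : s2.mem.readLE (g.e.reg .rsp - 184) 8 = s1.mem.readLE (g.e.reg .rsp - 184) 8 :=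
      frame_kept hent hs hoffst 184 8 (by omega) (by omega)
    rw [e]
    exact hc.fr_f
  · have e : s2.mem.readLE (g.e.reg .rsp - 216) 8 = s1.mem.readLE (g.e.reg .rsp - 216) 8 :=
      frame_kept hent hs hoffst 216 8 (by omega) (by omega)
    rw [e]
    exact hc.fr_rb
  · have e : s2.mem.readLE (g.e.reg .rsp - 156) 4 = s1.mem.readLE (g.e.reg .rsp - 156) 4 :=
      frame_kept hent hs hoffst 156 4 (by omega) (by omega)
    rw [e]
    exact hc.fr_ch
  · have e : s2.mem.readLE (g.e.reg .rsp - 196) 4 = s1.mem.readLE (g.e.reg .rsp - 196) 4 :=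
      frame_kept hent hs hoffst 196 4 (by omega) (by omega)
    rw [e]
    exact hc.fr_prd
  · have e : s2.mem.readLE (g.e.reg .rsp - 200) 4 = s1.mem.readLE (g.e.reg .rsp - 200) 4 :=
      frame_kept hent hs hoffst 200 4 (by omega) (by omega)
    rw [e]
    exact hc.fr_w
  · have e : s2.mem.readLE (g.e.reg .rsp - 232) 4 = s1.mem.readLE (g.e.reg .rsp - 232) 4 :=
      frame_kept hent hs hoffst 232 4 (by omega) (by omega)
    rw [e]
    exact hc.fr_rtype
  · have e : s2.mem.readLE (g.e.reg .rsp - 176) 8 = s1.mem.readLE (g.e.reg .rsp - 176) 8 :=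
      frame_kept hent hs hoffst 176 8 (by omega) (by omega)
    rw [e]
    exact hc.fr_pcd
  · have e : s2.mem.readLE (g.e.reg .rsp - 240) 8 = s1.mem.readLE (g.e.reg .rsp - 240) 8 :=
      frame_kept hent hs hoffst 240 8 (by omega) (by omega)
    rw [e]
    exact hc.fr_si
  · -- the footprint: the slot lies in the free part of the arena
    apply Mem.SameExcept.step_same' hc.same hs
    intro w hw
    have e : w = ⟨slot g.TB g.C g.PRD 0 cs, slot g.TB g.C g.PRD 0 cs + 8⟩ := List.mem_singleton.mp hw
    subst e
    right
    unfold Spec.footprint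
    have hwr : g.spec.writes g.e = DecodeResidue.writes g.A g.e := rfl
    rw [hwr]
    unfold DecodeResidue.writes
    refine ⟨_, List.Mem.tail _ (List.mem_append_left _ (List.Mem.tail _ (List.Mem.tail _ (List.Mem.tail _
      (List.Mem.tail _ (List.Mem.tail _ (List.Mem.head _))))))), ?_, ?_⟩
    · simp only []
      omega
    · simp only []
      omega
  · exact hc.shadow.untouched hun
  · exact hbits.frame_fields (Bits.SameFields.of_same hobj)
  · apply hbusy.transfer
    apply ObjEq.of_sameExcept hs
    · intro w hw
      simp only [ADO.wins, List.mem_cons, List.mem_nil_iff, or_false] at hw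
      rcases hw with rfl | rfl <;> simp only [] <;> omega
    · intro w hw sp hsp
      have e : sp = ⟨slot g.TB g.C g.PRD 0 cs, slot g.TB g.C g.PRD 0 cs + 8⟩ := List.mem_singleton.mp hsp
      subst e
      simp only [ADO.wins, List.mem_cons, List.mem_nil_iff, or_false] at hw
      rcases hw with rfl | rfl <;> simp only [] <;> omega
  · rw [hmem]
    exact hc.tb.store_slot hC hcs row (by omega)
  · have e := mu_frame_obj (by omega) hobj
    have := hc.mu_le
    omega

/-- **The loop part of the exit assertion (`InnerA` with `i = 0`) after the store of pass 0**: the slot `class_set` of row 0 now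
holds a row pointer (`Fill.store`), the slots below are untouched, the frame's slots and the two ints are off the temp block. -/
theorem final_inner {u₀ : State} {g : G} {s1 s2 : State} {cs pcount : Nat} (hent : Entered u₀ g) (hc : Common u₀ g s1)
    (hc2 : Common u₀ g s2) (hl : DecodeA g cs pcount s1) (r15 : s2.reg .r15 = UInt64.ofNat pcount) (row : Nat)
    (hrow : RowPtr s1.mem g.f g.r row) (hrow_lt : row < 2 ^ 64)
    (hmem : s2.mem = s1.mem.writeLE (addr (slot g.TB g.C g.PRD 0 cs)) 8 row)
    (hs : Mem.SameExcept [⟨slot g.TB g.C g.PRD 0 cs, slot g.TB g.C g.PRD 0 cs + 8⟩] s1.mem s2.mem) :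
    InnerA g 0 cs pcount s2 := by
  have hroom := hent.room
  have hwt := where_tb hent hc
  have eR : (g.e.reg .rsp).toNat = g.RA := rfl
  have hcs : cs < g.PRD := hl.wa.slot_lt (hc.w_pos hent) hl.lt
  have hC : 0 < g.C := by
    have := hent.args.ch_le
    have e : g.C = nchan g.e.mem g.f := rfl
    have := hl.path.ch_ge
    omega
  have hin := slot_inside g.TB hC hcs hc.tb.size
  have hoffst : slot g.TB g.C g.PRD 0 cs + 8 ≤ 0x700000 ∨ 0x800000 ≤ slot g.TB g.C g.PRD 0 cs := by omega
  have hi32 : ∀ a : Nat, g.RA - 176 ≤ a → a + 4 ≤ g.RA → s2.mem.i32 a = s1.mem.i32 a := by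
    intro a h1 h2
    have ea : (addr a).toNat = a := toNat_addr a (by omega)
    have e : s2.mem.readLE (addr a) 4 = s1.mem.readLE (addr a) 4 := by
      apply hs.readLE _ _ (by rw [ea]; omega)
      intro w hw
      have e : w = ⟨slot g.TB g.C g.PRD 0 cs, slot g.TB g.C g.PRD 0 cs + 8⟩ := List.mem_singleton.mp hw
      subst e
      rw [ea]
      simp only []
      omega
    show sint32 (s2.mem.readLE (addr a) 4) = sint32 (s1.mem.readLE (addr a) 4)
    rw [e]
  have hv1 : Real.VorbisOK g.len g.Blk s1.mem g.f := hc.point.vorbis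
  have hcd : (Block.mk (Residue.classdata s1.mem g.r) (8 * Residue.E s1.mem g.f g.r)).Kept s1.mem s2.mem := by
    have hB := (hc.resAt hent).R8a
    apply Block.Kept.of_sameExcept hs _ (hent.pre.env.ok.no_wrap hB)
    intro w hw
    have e : w = ⟨slot g.TB g.C g.PRD 0 cs, slot g.TB g.C g.PRD 0 cs + 8⟩ := List.mem_singleton.mp hw
    subst e
    have hgap := hent.pre.free.offGap _ hB
    simp only [] at hgap ⊢
    omega
  have hrd := reads_between hc hc2
  refine ⟨⟨hl.path.rtype2, hl.path.ch_ge, hl.path.pass_le, ?_, ?_, ?_⟩, r15, ?_, ?_, ?_⟩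
  · have e : s2.mem.readLE (g.e.reg .rsp - 168) 4 = s1.mem.readLE (g.e.reg .rsp - 168) 4 :=
      frame_kept hent hs hoffst 168 4 (by omega) (by omega)
    rw [e]
    exact hl.path.sl_pass
  · have e : s2.mem.readLE (g.e.reg .rsp - 228) 4 = s1.mem.readLE (g.e.reg .rsp - 228) 4 :=
      frame_kept hent hs hoffst 228 4 (by omega) (by omega)
    rw [e]
    exact hl.path.sl_tap
  · have e : s2.mem.readLE (g.e.reg .rsp - 208) 4 = s1.mem.readLE (g.e.reg .rsp - 208) 4 :=
      frame_kept hent hs hoffst 208 4 (by omega) (by omega)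
    rw [e]
    exact hl.path.sl_n
  · have e : s2.mem.readLE (g.e.reg .rsp - 224) 4 = s1.mem.readLE (g.e.reg .rsp - 224) 4 :=
      frame_kept hent hs hoffst 224 4 (by omega) (by omega)
    rw [e]
    exact hl.sl_cs
  · apply hl.wa.enter0 hl.lt
    intro j hj
    have hj0 : j = 0 := hj
    subst hj0
    rw [hmem]
    apply (hl.wa.fill0 rfl 0 rfl).store hC hcs hc.tb.size (by omega) row hrow_lt
    · intro w hw
      rw [← hmem]
      exact hw.frame hrd hcd
    · exact hrow
  · apply hl.inter.frame
    · exact hi32 g.ci (by unfold G.ci; omega) (by unfold G.ci; omega)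
    · exact hi32 g.pi (by unfold G.pi; omega) (by unfold G.pi; omega)

end Vorbis.Spec.decode_residue_5
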